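-- pv_equiv track=rewrite | github.com/Daniel-G2026/Geolog-AI | classification_engine.py | consistency_density_condition
-- ===== SOURCE A (Python) =====
-- COHESIVE_TERMS = ["silty clay", "clayey silt", "silt", "clay"]
--
-- COHESIONLESS_TERMS = ["sand and silt", "silty sand", "sandy silt", "sand and gravel", "sand", "gravel"]
--
-- def consistency_density_condition(soil_lower: str, n_value: int):
--     """
--     Core classification lookup. Takes a lowercase soil name and N-value integer,
--     returns the appropriate consistency or density term.
--
--     First strips 'till' if present — "silty clay till" becomes "silty clay"
--     for routing purposes, but the original name is preserved in the log.
--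
--     Boundary values (exact N=4, 8, 15 etc.) return transitional terms like
--     "soft to firm" — this mirrors how engineers handle borderline N-values.
--     """
--
--     # Strip 'till' suffix before routing — till is a depositional descriptor,
--     # not a soil type classifier. "sandy silt till" classifies same as "sandy silt"
--     if soil_lower.endswith("till"):
--         soil_lower = soil_lower.replace("till", "").strip()
--
--     if any(term in soil_lower for term in COHESIONLESS_TERMS):
--         # ── COHESIONLESS (SAND / GRAVEL) TABLE ──
--         # Source: ASTM D2488 relative density scale
--         if 0 <= n_value < 4:       return "very loose"
--         elif n_value == 4:         return "very loose to loose"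
--         elif 4 < n_value < 10:     return "loose"
--         elif n_value == 10:        return "loose to medium dense"
--         elif 10 < n_value < 30:    return "compact"
--         elif n_value == 30:        return "compact to dense"
--         elif 30 < n_value < 50:    return "dense"
--         elif n_value == 50:        return "dense to very dense"
--         elif n_value > 50:         return "very dense"
--
--     elif any(term in soil_lower for term in COHESIVE_TERMS):
--         # ── COHESIVE (CLAY / SILT) TABLE ──
--         # Source: ASTM D2488 consistency scale
--         if 0 <= n_value < 2:       return "very soft"
--         elif n_value == 2:         return "very soft to soft"
--         elif 2 < n_value < 4:      return "soft"
--         elif n_value == 4:         return "soft to firm"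
--         elif 4 < n_value < 8:      return "firm"
--         elif n_value == 8:         return "firm to stiff"
--         elif 8 < n_value < 15:     return "stiff"
--         elif n_value == 15:        return "stiff to very stiff"
--         elif 15 < n_value < 30:    return "very stiff"
--         elif n_value == 30:        return "very stiff to hard"
--         elif n_value > 30:         return "hard"
--
--     else:
--         # Soil type not recognized — return None to trigger manual review flag
--         return None
-- ===== SOURCE B (Python) =====
-- import bisect
--
-- COHESIVE_TERMS = ["silty clay", "clayey silt", "silt", "clay"]
-- COHESIONLESS_TERMS = ["sand and silt", "silty sand", "sandy silt", "sand and gravel", "sand", "gravel"]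
--
-- # exact boundary N-values -> transitional labels, plus sorted breakpoints and range labels
-- _TABLES = [
--     (COHESIONLESS_TERMS,
--      {4: "very loose to loose", 10: "loose to medium dense",
--       30: "compact to dense", 50: "dense to very dense"},
--      [4, 10, 30, 50],
--      ["very loose", "loose", "compact", "dense", "very dense"]),
--     (COHESIVE_TERMS,
--      {2: "very soft to soft", 4: "soft to firm", 8: "firm to stiff",
--       15: "stiff to very stiff", 30: "very stiff to hard"},
--      [2, 4, 8, 15, 30],
--      ["very soft", "soft", "firm", "stiff", "very stiff", "hard"]),
-- ]
--
-- def consistency_density_condition(soil_lower: str, n_value: int):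
--     if soil_lower.endswith("till"):
--         soil_lower = soil_lower.replace("till", "").strip()
--     for terms, exact, bounds, ranges in _TABLES:
--         if any(term in soil_lower for term in terms):
--             if n_value < 0:
--                 return None
--             if n_value in exact:
--                 return exact[n_value]
--             return ranges[bisect.bisect_left(bounds, n_value)]
--     return None
-- ===== Notes on version B (the rewrite author's own statement) =====
-- stated objective: idiomatic
-- what changed: Replaces A's two hard-coded if/elif ladders with data tables: per scale a dict of exact boundary N-values to transitional labels plus sorted breakpoints indexed by bisect_left into a range-label list, dispatched in one loop over the tables.
import Mathlib
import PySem

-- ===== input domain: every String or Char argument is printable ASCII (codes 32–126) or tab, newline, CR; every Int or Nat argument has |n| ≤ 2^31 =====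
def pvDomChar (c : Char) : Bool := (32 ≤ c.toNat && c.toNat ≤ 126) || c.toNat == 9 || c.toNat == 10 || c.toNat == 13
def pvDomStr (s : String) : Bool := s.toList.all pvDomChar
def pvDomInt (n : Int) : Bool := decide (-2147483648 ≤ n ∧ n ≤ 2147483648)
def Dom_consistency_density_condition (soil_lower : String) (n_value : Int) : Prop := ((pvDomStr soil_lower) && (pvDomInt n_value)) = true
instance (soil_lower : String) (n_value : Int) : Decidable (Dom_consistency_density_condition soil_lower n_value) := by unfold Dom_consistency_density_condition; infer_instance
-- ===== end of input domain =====

-- B replaces A's two if/elif ladders by data: per scale, a dict of exact boundary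
-- N-values -> transitional labels plus sorted breakpoints indexing a range-label list
-- via bisect_left; objective: idiomatic, same cost.

-- ===== PORT A =====
def COHESIVE_TERMS : List String := ["silty clay", "clayey silt", "silt", "clay"]
def COHESIONLESS_TERMS : List String := ["sand and silt", "silty sand", "sandy silt", "sand and gravel", "sand", "gravel"]

def consistency_density_condition (soil_lower : String) (n_value : Int) : Option String :=
  let soil_lower :=
    if PySem.Str.endswith soil_lower "till" then
      PySem.Str.strip (PySem.Str.replace soil_lower "till" "")
    else soil_lower
  if COHESIONLESS_TERMS.any (fun term => PySem.Str.isIn term soil_lower) then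
    if 0 ≤ n_value ∧ n_value < 4 then some "very loose"
    else if n_value = 4 then some "very loose to loose"
    else if 4 < n_value ∧ n_value < 10 then some "loose"
    else if n_value = 10 then some "loose to medium dense"
    else if 10 < n_value ∧ n_value < 30 then some "compact"
    else if n_value = 30 then some "compact to dense"
    else if 30 < n_value ∧ n_value < 50 then some "dense"
    else if n_value = 50 then some "dense to very dense"
    else if n_value > 50 then some "very dense"
    else none
  else if COHESIVE_TERMS.any (fun term => PySem.Str.isIn term soil_lower) then
    if 0 ≤ n_value ∧ n_value < 2 then some "very soft"
    else if n_value = 2 then some "very soft to soft"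
    else if 2 < n_value ∧ n_value < 4 then some "soft"
    else if n_value = 4 then some "soft to firm"
    else if 4 < n_value ∧ n_value < 8 then some "firm"
    else if n_value = 8 then some "firm to stiff"
    else if 8 < n_value ∧ n_value < 15 then some "stiff"
    else if n_value = 15 then some "stiff to very stiff"
    else if 15 < n_value ∧ n_value < 30 then some "very stiff"
    else if n_value = 30 then some "very stiff to hard"
    else if n_value > 30 then some "hard"
    else none
  else none

-- ===== PORT B =====
-- bisect.bisect_left on a sorted list = length of the longest prefix of elements < n (exact on sorted input)
def pvBisectLeft (bounds : List Int) (n : Int) : Nat := (bounds.takeWhile (fun b => b < n)).length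

def pvTables : List (List String × PySem.Dict Int String × List Int × List String) :=
  [ (COHESIONLESS_TERMS,
     PySem.Dict.mk [(4, "very loose to loose"), (10, "loose to medium dense"),
                    (30, "compact to dense"), (50, "dense to very dense")],
     [4, 10, 30, 50],
     ["very loose", "loose", "compact", "dense", "very dense"]),
    (COHESIVE_TERMS,
     PySem.Dict.mk [(2, "very soft to soft"), (4, "soft to firm"), (8, "firm to stiff"),
                    (15, "stiff to very stiff"), (30, "very stiff to hard")],
     [2, 4, 8, 15, 30],
     ["very soft", "soft", "firm", "stiff", "very stiff", "hard"]) ]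

def pvClassifyLoop (s : String) (n : Int) :
    List (List String × PySem.Dict Int String × List Int × List String) → Option String
  | [] => none
  | (terms, exact, bounds, ranges) :: rest =>
    if terms.any (fun term => PySem.Str.isIn term s) then
      if n < 0 then none
      else match exact.get? n with
        | some v => some v
        | none => PySem.List.pyGet? ranges (pvBisectLeft bounds n)
    else pvClassifyLoop s n rest

def consistency_density_condition_alt (soil_lower : String) (n_value : Int) : Option String :=
  let soil_lower :=
    if PySem.Str.endswith soil_lower "till" then
      PySem.Str.strip (PySem.Str.replace soil_lower "till" "")
    else soil_lower
  pvClassifyLoop soil_lower n_value pvTables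

-- ===== PRECONDITION & SPEC =====
def Spec_consistency_density_condition (soil_lower : String) (n_value : Int) (out : Option String) : Prop := out = consistency_density_condition_alt soil_lower n_value
instance (soil_lower : String) (n_value : Int) (out : Option String) : Decidable (Spec_consistency_density_condition soil_lower n_value out) := by unfold Spec_consistency_density_condition; infer_instance

-- ===== CLAIM (what is proved, stated in full; the proofs are below) =====
def Claim_equal_consistency_density_condition : Prop := ∀ (soil_lower : String) (n_value : Int), Dom_consistency_density_condition soil_lower n_value → Spec_consistency_density_condition soil_lower n_value (consistency_density_condition soil_lower n_value)

-- ===== LEMMAS AND PROOFS =====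

set_option maxHeartbeats 2000000 in
theorem pvCohesionless_branch (n : Int) :
    (if 0 ≤ n ∧ n < 4 then some "very loose"
     else if n = 4 then some "very loose to loose"
     else if 4 < n ∧ n < 10 then some "loose"
     else if n = 10 then some "loose to medium dense"
     else if 10 < n ∧ n < 30 then some "compact"
     else if n = 30 then some "compact to dense"
     else if 30 < n ∧ n < 50 then some "dense"
     else if n = 50 then some "dense to very dense"
     else if n > 50 then some "very dense"
     else none) =
    (if n < 0 then none
     else match (PySem.Dict.mk [((4:Int), "very loose to loose"), (10, "loose to medium dense"),
                    (30, "compact to dense"), (50, "dense to very dense")]).get? n with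
        | some v => some v
        | none => PySem.List.pyGet? ["very loose", "loose", "compact", "dense", "very dense"]
                    (pvBisectLeft [4, 10, 30, 50] n)) := by
  simp only [PySem.Dict.get?_mk_cons, beq_iff_eq, pvBisectLeft, List.takeWhile_cons,
    decide_eq_true_eq, List.takeWhile_nil]
  split_ifs <;> first | rfl | omega

set_option maxHeartbeats 2000000 in
theorem pvCohesive_branch (n : Int) :
    (if 0 ≤ n ∧ n < 2 then some "very soft"
     else if n = 2 then some "very soft to soft"
     else if 2 < n ∧ n < 4 then some "soft"
     else if n = 4 then some "soft to firm"
     else if 4 < n ∧ n < 8 then some "firm"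
     else if n = 8 then some "firm to stiff"
     else if 8 < n ∧ n < 15 then some "stiff"
     else if n = 15 then some "stiff to very stiff"
     else if 15 < n ∧ n < 30 then some "very stiff"
     else if n = 30 then some "very stiff to hard"
     else if n > 30 then some "hard"
     else none) =
    (if n < 0 then none
     else match (PySem.Dict.mk [((2:Int), "very soft to soft"), (4, "soft to firm"), (8, "firm to stiff"),
                    (15, "stiff to very stiff"), (30, "very stiff to hard")]).get? n with
        | some v => some v
        | none => PySem.List.pyGet? ["very soft", "soft", "firm", "stiff", "very stiff", "hard"]
                    (pvBisectLeft [2, 4, 8, 15, 30] n)) := by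
  simp only [PySem.Dict.get?_mk_cons, beq_iff_eq, pvBisectLeft, List.takeWhile_cons,
    decide_eq_true_eq, List.takeWhile_nil]
  split_ifs <;> first | rfl | omega

-- ===== VERDICT (by name: the statement is the Claim_ definition above) =====
theorem consistency_density_condition_spec : Claim_equal_consistency_density_condition := by
  intro soil_lower n_value _
  unfold Spec_consistency_density_condition consistency_density_condition consistency_density_condition_alt
  simp only [pvTables, pvClassifyLoop]
  by_cases h1 : COHESIONLESS_TERMS.any (fun term => PySem.Str.isIn term
      (if PySem.Str.endswith soil_lower "till" then
        PySem.Str.strip (PySem.Str.replace soil_lower "till" "") else soil_lower)) = true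
  · simp only [h1, if_true]
    exact pvCohesionless_branch n_value
  · simp only [eq_false_of_ne_true h1, if_false, Bool.false_eq_true]
    by_cases h2 : COHESIVE_TERMS.any (fun term => PySem.Str.isIn term
        (if PySem.Str.endswith soil_lower "till" then
          PySem.Str.strip (PySem.Str.replace soil_lower "till" "") else soil_lower)) = true
    · simp only [h2, if_true]
      exact pvCohesive_branch n_value
    · simp only [eq_false_of_ne_true h2, if_false, Bool.false_eq_true]
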